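-- pv_equiv track=rewrite | github.com/cmedina-dev/AOC-2024 | day_9/day_9.py | update_spans
-- ===== SOURCE A (Python) =====
-- def update_spans(s):
--     spans = []
--     l = 0
--     count = 0
--     start = None
--
--     for _, char in enumerate(s):
--         if char == '.':
--             if count == 0:
--                 start = l
--             count += 1
--         else:
--             if count > 0:
--                 spans.append((start, count))
--                 count = 0
--         l += 1
--     if count > 0:
--         spans.append((start, count))
--     return sorted(spans, key=lambda x: x[0])
-- ===== SOURCE B (Python) =====
-- def update_spans(s):
--     n = len(s)
--     starts = [i for i in range(n) if s[i] == '.' and (i == 0 or s[i - 1] != '.')]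
--     ends = [i for i in range(n) if s[i] == '.' and (i + 1 == n or s[i + 1] != '.')]
--     return [(a, b - a + 1) for a, b in zip(starts, ends)]
-- ===== Notes on version B (the rewrite author's own statement) =====
-- stated objective: alternative
-- what changed: Replaces A's single-pass per-character state machine (count/start accumulators, final flush, sort) with staged boundary detection: one pass collects run-start indices, another collects run-end indices, and zipping the two lists yields the (start, length) spans with no mutable state and no sort.
import Mathlib
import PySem

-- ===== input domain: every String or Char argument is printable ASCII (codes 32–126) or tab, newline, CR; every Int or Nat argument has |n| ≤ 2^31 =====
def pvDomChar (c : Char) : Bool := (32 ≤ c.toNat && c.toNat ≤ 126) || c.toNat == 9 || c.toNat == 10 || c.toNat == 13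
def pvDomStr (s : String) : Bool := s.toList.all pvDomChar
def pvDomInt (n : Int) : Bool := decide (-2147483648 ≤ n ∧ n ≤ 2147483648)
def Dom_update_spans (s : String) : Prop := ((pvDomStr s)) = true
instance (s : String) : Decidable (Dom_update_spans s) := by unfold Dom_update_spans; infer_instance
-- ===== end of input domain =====

-- B replaces A's per-character count/start state machine (plus final flush and sort) with
-- staged boundary detection: one pass finds run-start indices, one finds run-end indices,
-- and zipping the two lists yields the (start, length) spans; no mutable state, no sort.

-- ===== PORT A =====
-- A's loop state: (spans, l, count, start). start is Python's None → Option Int; A only reads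
-- start when count > 0, at which point it is always `some _`, so `.getD 0` is exact there.
def stepA (st : List (Int × Int) × Int × Int × Option Int) (char : Char) :
    List (Int × Int) × Int × Int × Option Int :=
  match st with
  | (spans, l, count, start) =>
    if char = '.' then
      (spans, l + 1, count + 1, if count = 0 then some l else start)
    else
      if count > 0 then (spans ++ [(start.getD 0, count)], l + 1, 0, start)
      else (spans, l + 1, count, start)

def flushA (st : List (Int × Int) × Int × Int × Option Int) : List (Int × Int) :=
  match st with
  | (spans, _, count, start) => if count > 0 then spans ++ [(start.getD 0, count)] else spans

def update_spans (s : String) : List (Int × Int) :=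
  PySem.List.sorted (flushA (s.toList.foldl stepA ([], 0, 0, none))) (fun x => x.1) false

-- ===== PORT B =====
-- B's start-of-run test: s[i] == '.' and (i == 0 or s[i-1] != '.'). Indices come from
-- range(n) so every access is in range and `getD` with a dummy default is exact.
def startP (cs : List Char) (i : Nat) : Bool :=
  cs.getD i ' ' == '.' && (i == 0 || cs.getD (i - 1) ' ' != '.')

-- B's end-of-run test: s[i] == '.' and (i + 1 == n or s[i+1] != '.')
def endP (cs : List Char) (i : Nat) : Bool :=
  cs.getD i ' ' == '.' && (i + 1 == cs.length || cs.getD (i + 1) ' ' != '.')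

def update_spans_alt (s : String) : List (Int × Int) :=
  let cs := s.toList
  let starts := (List.range cs.length).filter (startP cs)
  let ends := (List.range cs.length).filter (endP cs)
  (starts.zip ends).map (fun p => ((p.1 : Int), (p.2 : Int) - (p.1 : Int) + 1))

-- ===== PRECONDITION & SPEC =====
def Spec_update_spans (s : String) (out : List (Int × Int)) : Prop := out = update_spans_alt s
instance (s : String) (out : List (Int × Int)) : Decidable (Spec_update_spans s out) := by unfold Spec_update_spans; infer_instance

-- ===== CLAIM (what is proved, stated in full; the proofs are below) =====
def Claim_equal_update_spans : Prop := ∀ (s : String), Dom_update_spans s → Spec_update_spans s (update_spans s)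

-- ===== LEMMAS AND PROOFS =====

-- Proof intermediary: a run-at-a-time recursion both ports are reduced to.
-- length of the leading run of dots
def runLen (cs : List Char) : Nat :=
  match cs with
  | [] => 0
  | c :: rest => if c = '.' then runLen rest + 1 else 0

def scanSpans (cs : List Char) (pos : Int) : List (Int × Int) :=
  match cs with
  | [] => []
  | c :: rest =>
    if c = '.' then
      let k := runLen rest + 1
      (pos, (k : Int)) :: scanSpans (rest.drop (runLen rest)) (pos + k)
    else scanSpans rest (pos + 1)
termination_by cs.length
decreasing_by
  all_goals simp only [List.length_drop, List.length_cons]; omega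

theorem scanSpans_nil (pos : Int) : scanSpans [] pos = [] := by
  rw [scanSpans]

theorem scanSpans_cons_dot (rest : List Char) (pos : Int) :
    scanSpans ('.' :: rest) pos
      = (pos, ((runLen rest + 1 : Nat) : Int))
          :: scanSpans (rest.drop (runLen rest)) (pos + ((runLen rest + 1 : Nat) : Int)) := by
  rw [scanSpans]; simp

theorem scanSpans_cons_of_ne (c : Char) (rest : List Char) (pos : Int) (hd : ¬ c = '.') :
    scanSpans (c :: rest) pos = scanSpans rest (pos + 1) := by
  rw [scanSpans]; simp [hd]

-- ===== A-side: fold = scanSpans =====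
theorem foldA_eq_scan (cs : List Char) :
    (∀ (spans : List (Int × Int)) (pos : Int) (st0 : Option Int),
      flushA (cs.foldl stepA (spans, pos, 0, st0)) = spans ++ scanSpans cs pos)
    ∧ (∀ (spans : List (Int × Int)) (s0 c : Int), 0 < c →
      flushA (cs.foldl stepA (spans, s0 + c, c, some s0))
        = spans ++ (s0, c + (runLen cs : Int))
            :: scanSpans (cs.drop (runLen cs)) (s0 + c + (runLen cs : Int))) := by
  induction cs with
  | nil =>
    constructor
    · intro spans pos st0; simp [flushA, scanSpans_nil]
    · intro spans s0 c hc
      simp [flushA, runLen, scanSpans_nil, hc]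
  | cons d rest ih =>
    constructor
    · intro spans pos st0
      by_cases hd : d = '.'
      · have h2 := ih.2 spans pos 1 (by omega)
        subst hd
        rw [scanSpans_cons_dot]
        simp only [List.foldl_cons, stepA, zero_add, if_true]
        rw [h2]
        push_cast
        ring_nf
      · have h1 := ih.1 spans (pos + 1) st0
        rw [scanSpans_cons_of_ne d rest pos hd]
        simp only [List.foldl_cons, stepA, if_neg hd, gt_iff_lt, lt_irrefl, if_false]
        exact h1
    · intro spans s0 c hc
      by_cases hd : d = '.'
      · have h2 := ih.2 spans s0 (c + 1) (by omega)
        rw [show s0 + (c + 1) = s0 + c + 1 from by ring] at h2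
        subst hd
        simp only [List.foldl_cons, stepA, runLen, if_true,
          if_neg (by omega : ¬ c = 0), List.drop_succ_cons]
        rw [h2]
        push_cast
        ring_nf
      · have h1 := ih.1 (spans ++ [(s0, c)]) (s0 + c + 1) (some s0)
        simp only [List.foldl_cons, stepA, if_neg hd, gt_iff_lt, if_pos hc, Option.getD_some]
        rw [h1]
        simp only [runLen, if_neg hd, List.drop_zero, Nat.cast_zero, add_zero]
        rw [scanSpans_cons_of_ne d rest (s0 + c) hd]
        simp [List.append_assoc]

-- scanSpans emits spans in increasing-start order (so A's sort is the identity)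
theorem scanSpans_pairwise (cs : List Char) (pos : Int) :
    (∀ p ∈ scanSpans cs pos, pos ≤ p.1)
    ∧ (scanSpans cs pos).Pairwise (fun a b => a.1 ≤ b.1) := by
  fun_induction scanSpans cs pos with
  | case1 pos => simp
  | case2 a b c d =>
    obtain ⟨dlo, dpw⟩ := d
    refine ⟨?_, List.Pairwise.cons ?_ dpw⟩
    · intro p hp
      rcases List.mem_cons.mp hp with h | h
      · simp [h]
      · have := dlo p h
        omega
    · intro q hq
      have := dlo q hq
      simp only []
      omega
  | case3 a b c d e =>
    exact ⟨fun p hp => by have := e.1 p hp; omega, e.2⟩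

-- ===== B-side: facts about runLen =====
theorem runLen_le (cs : List Char) : runLen cs ≤ cs.length := by
  induction cs with
  | nil => simp [runLen]
  | cons c rest ih => by_cases h : c = '.' <;> simp [runLen, h] <;> omega

theorem runLen_dot (cs : List Char) (j : Nat) (hj : j < runLen cs) :
    cs.getD j ' ' = '.' := by
  induction cs generalizing j with
  | nil => simp [runLen] at hj
  | cons c rest ih =>
    by_cases h : c = '.'
    · cases j with
      | zero => simpa [h]
      | succ j' =>
        simp only [runLen, h, if_true] at hj
        simpa using ih j' (by omega)
    · simp [runLen, h] at hj

theorem runLen_stop (cs : List Char) (h : runLen cs < cs.length) :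
    cs.getD (runLen cs) ' ' ≠ '.' := by
  induction cs with
  | nil => simp at h
  | cons c rest ih =>
    by_cases hc : c = '.'
    · simp only [runLen, hc, if_true] at h ⊢
      simpa using ih (by simpa using h)
    · simpa [runLen, hc] using hc

theorem getD_drop (cs : List Char) (k i : Nat) :
    (cs.drop k).getD i ' ' = cs.getD (k + i) ' ' := by
  simp [List.getD_eq_getElem?_getD, List.getElem?_drop]

theorem getD_cons_add (c : Char) (l : List Char) (k i : Nat) :
    (c :: l).getD (k + 1 + i) ' ' = l.getD (k + i) ' ' := by
  rw [show k + 1 + i = (k + i) + 1 from by omega]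
  exact List.getD_cons_succ ..

theorem nat_beq_comm (a b : Nat) : (a == b) = (b == a) := by
  simp [eq_comm]

theorem dot_run_getD (rest : List Char) (i : Nat) (hi : i ≤ runLen rest) :
    ('.' :: rest).getD i ' ' = '.' := by
  cases i with
  | zero => simp
  | succ j => simpa using runLen_dot rest j (by omega)

-- ===== B-side: generic filter/range helpers =====
theorem filter_range_succ_shift (n : Nat) (p : Nat → Bool) (h0 : p 0 = false) :
    (List.range (n + 1)).filter p
      = ((List.range n).filter (fun i => p (i + 1))).map (· + 1) := by
  rw [List.range_succ_eq_map]
  simp [List.filter_cons, h0, List.filter_map, Function.comp_def, Nat.succ_eq_add_one]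

theorem filter_range_eq_zero (k : Nat) :
    (List.range (k + 1)).filter (fun i => i == 0) = [0] := by
  rw [List.range_succ_eq_map]
  simp [List.filter_map]

theorem filter_range_eq_last (k : Nat) :
    (List.range (k + 1)).filter (fun i => i == k) = [k] := by
  rw [List.range_succ, List.filter_append]
  have h : (List.range k).filter (fun i => i == k) = [] := by
    rw [List.filter_eq_nil_iff]
    intro i hi
    have := List.mem_range.mp hi
    simp
    omega
  simp [h]

-- ===== B-side: shift lemmas for non-dot head =====
theorem startP_shift (c : Char) (rest : List Char) (hd : ¬ c = '.') (i : Nat) :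
    startP (c :: rest) (i + 1) = startP rest i := by
  cases i with
  | zero => simp [startP, hd]
  | succ j => simp [startP]

theorem endP_shift (c : Char) (rest : List Char) (i : Nat) :
    endP (c :: rest) (i + 1) = endP rest i := by
  cases i with
  | zero => simp [endP, nat_beq_comm]
  | succ j =>
    simp only [endP, List.getD_cons_succ, List.length_cons]
    have h : (j + 1 + 1 + 1 == rest.length + 1) = (j + 1 + 1 == rest.length) := by
      simp
    rw [h]

theorem starts_cons_ne (c : Char) (rest : List Char) (hd : ¬ c = '.') :
    (List.range (c :: rest).length).filter (startP (c :: rest))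
      = (((List.range rest.length).filter (startP rest)).map (· + 1)) := by
  rw [List.length_cons, filter_range_succ_shift _ _ (by simp [startP, hd])]
  congr 1
  exact List.filter_congr (fun i _ => startP_shift c rest hd i)

theorem ends_cons_ne (c : Char) (rest : List Char) (hd : ¬ c = '.') :
    (List.range (c :: rest).length).filter (endP (c :: rest))
      = (((List.range rest.length).filter (endP rest)).map (· + 1)) := by
  rw [List.length_cons, filter_range_succ_shift _ _ (by simp [endP, hd])]
  congr 1
  exact List.filter_congr (fun i _ => endP_shift c rest i)

-- ===== B-side: shift lemmas for a dot head (run of length runLen rest + 1) =====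
theorem starts_pred_shift_dot (rest : List Char) (i : Nat)
    (hi : i < rest.length - runLen rest) :
    startP ('.' :: rest) (runLen rest + 1 + i) = startP (rest.drop (runLen rest)) i := by
  set k := runLen rest with hk
  have hklt : k < rest.length := by omega
  cases i with
  | zero =>
    have hne : rest.getD k ' ' ≠ '.' := runLen_stop rest hklt
    have hfalse : (rest.getD k ' ' == '.') = false := by simpa using hne
    simp only [startP, Nat.add_zero, List.getD_cons_succ, getD_drop, hfalse, Bool.false_and]
  | succ j =>
    have e0 : k + 1 + (j + 1) = (k + (j + 1)) + 1 := by omega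
    have e1 : k + (j + 1) + 1 - 1 = (k + j) + 1 := by omega
    simp only [startP, e0, e1, List.getD_cons_succ, getD_drop, Nat.add_sub_cancel]
    simp

theorem ends_pred_shift_dot (rest : List Char) (i : Nat) :
    endP ('.' :: rest) (runLen rest + 1 + i) = endP (rest.drop (runLen rest)) i := by
  set k := runLen rest with hk
  have hkle : k ≤ rest.length := runLen_le rest
  have h1 : ('.' :: rest).getD (k + 1 + i) ' ' = (rest.drop k).getD i ' ' :=
    (getD_cons_add '.' rest k i).trans (getD_drop rest k i).symm
  have h2 : ('.' :: rest).getD (k + 1 + i + 1) ' ' = (rest.drop k).getD (i + 1) ' ' := by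
    rw [show k + 1 + i + 1 = k + 1 + (i + 1) from by omega]
    exact (getD_cons_add '.' rest k (i + 1)).trans (getD_drop rest k (i + 1)).symm
  have h3 : (k + 1 + i + 1 == ('.' :: rest).length) = (i + 1 == (rest.drop k).length) := by
    simp only [List.length_cons, List.length_drop]
    have hiff : (k + 1 + i = rest.length) ↔ (i + 1 = rest.length - k) := by omega
    simp [hiff]
  simp only [endP, h1, h2, h3]

theorem starts_cons_dot (rest : List Char) :
    (List.range ('.' :: rest).length).filter (startP ('.' :: rest))
      = 0 :: (((List.range (rest.drop (runLen rest)).length).filter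
            (startP (rest.drop (runLen rest)))).map (· + (runLen rest + 1))) := by
  set k := runLen rest with hk
  have hkle : k ≤ rest.length := runLen_le rest
  have hsplit : ('.' :: rest).length = (k + 1) + (rest.length - k) := by
    simp only [List.length_cons]; omega
  rw [hsplit, List.range_add, List.filter_append]
  have part1 : (List.range (k + 1)).filter (startP ('.' :: rest)) = [0] := by
    have hc : ∀ i ∈ List.range (k + 1), startP ('.' :: rest) i = (i == 0) := by
      intro i hi
      have hi' : i < k + 1 := List.mem_range.mp hi
      cases i with
      | zero => simp [startP]
      | succ j =>
        have hdot : ('.' :: rest).getD j ' ' = '.' := dot_run_getD rest j (by omega)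
        rw [List.getD_eq_getElem?_getD] at hdot
        simp [startP, hdot]
    rw [List.filter_congr hc, filter_range_eq_zero]
  have part2 : ((List.range (rest.length - k)).map (fun x => k + 1 + x)).filter
        (startP ('.' :: rest))
      = ((List.range (rest.drop k).length).filter (startP (rest.drop k))).map
          (fun x => x + (k + 1)) := by
    rw [List.filter_map, List.length_drop]
    have hc : ∀ i ∈ List.range (rest.length - k),
        (startP ('.' :: rest) ∘ (fun x => k + 1 + x)) i = startP (rest.drop k) i := by
      intro i hi
      have hi' : i < rest.length - k := List.mem_range.mp hi
      exact starts_pred_shift_dot rest i hi'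
    rw [List.filter_congr hc]
    exact (List.map_congr_left (fun a _ => by omega))
  rw [part1, part2]
  rfl

theorem ends_cons_dot (rest : List Char) :
    (List.range ('.' :: rest).length).filter (endP ('.' :: rest))
      = runLen rest :: (((List.range (rest.drop (runLen rest)).length).filter
            (endP (rest.drop (runLen rest)))).map (· + (runLen rest + 1))) := by
  set k := runLen rest with hk
  have hkle : k ≤ rest.length := runLen_le rest
  have hsplit : ('.' :: rest).length = (k + 1) + (rest.length - k) := by
    simp only [List.length_cons]; omega
  rw [hsplit, List.range_add, List.filter_append]
  have part1 : (List.range (k + 1)).filter (endP ('.' :: rest)) = [k] := by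
    have hc : ∀ i ∈ List.range (k + 1), endP ('.' :: rest) i = (i == k) := by
      intro i hi
      have hi' : i < k + 1 := List.mem_range.mp hi
      have hdi : ('.' :: rest).getD i ' ' = '.' := dot_run_getD rest i (by omega)
      rw [List.getD_eq_getElem?_getD] at hdi
      by_cases hik : i = k
      · subst hik
        by_cases hend : k = rest.length
        · rw [hend] at hdi
          have hget : ('.' :: rest)[rest.length] = '.' := by
            have hlen : rest.length < ('.' :: rest).length := by simp
            rw [List.getElem?_eq_getElem hlen] at hdi
            simpa using hdi
          simp [endP, hend]
          exact hget
        · have hne : rest.getD k ' ' ≠ '.' := runLen_stop rest (by omega)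
          rw [List.getD_eq_getElem?_getD] at hne
          simp [endP, hdi, hne]
      · have hlti : i < k := by omega
        have hnext : rest.getD i ' ' = '.' := runLen_dot rest i (by omega)
        rw [List.getD_eq_getElem?_getD] at hnext
        simp [endP, hdi, hnext, hik]
        omega
    rw [List.filter_congr hc, filter_range_eq_last]
  have part2 : ((List.range (rest.length - k)).map (fun x => k + 1 + x)).filter
        (endP ('.' :: rest))
      = ((List.range (rest.drop k).length).filter (endP (rest.drop k))).map
          (fun x => x + (k + 1)) := by
    rw [List.filter_map, List.length_drop]
    have hc : ∀ i ∈ List.range (rest.length - k),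
        (endP ('.' :: rest) ∘ (fun x => k + 1 + x)) i = endP (rest.drop k) i := by
      intro i _
      exact ends_pred_shift_dot rest i
    rw [List.filter_congr hc]
    exact (List.map_congr_left (fun a _ => by omega))
  rw [part1, part2]
  rfl

-- ===== B-side: scanSpans = boundary zip =====
theorem scan_eq_boundaries (cs : List Char) (pos : Int) :
    scanSpans cs pos
      = ((((List.range cs.length).filter (startP cs)).zip
            ((List.range cs.length).filter (endP cs))).map
          (fun p => (pos + (p.1 : Int), (p.2 : Int) - (p.1 : Int) + 1))) := by
  fun_induction scanSpans cs pos with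
  | case1 pos => simp
  | case2 a b c d =>
    have hc : c = runLen b + 1 := rfl
    rw [starts_cons_dot b, ends_cons_dot b, List.zip_cons_cons, List.map_cons]
    congr 1
    · rw [hc]
      simp [Prod.ext_iff]
    · rw [List.zip_map, List.map_map, d]
      apply List.map_congr_left
      intro p hp
      rw [hc]
      simp [Prod.map, Prod.ext_iff]
      push_cast
      ring
  | case3 a b c d e =>
    rw [starts_cons_ne b c d, ends_cons_ne b c d, List.zip_map, List.map_map, e]
    apply List.map_congr_left
    intro p hp
    simp [Prod.map, Prod.ext_iff]
    push_cast
    ring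

-- ===== VERDICT =====
theorem update_spans_spec : Claim_equal_update_spans := by
  intro s _
  unfold Spec_update_spans update_spans update_spans_alt
  rw [(foldA_eq_scan s.toList).1 [] 0 none]
  simp only [List.nil_append]
  rw [PySem.List.sorted_eq_self_of_pairwise _ _ (scanSpans_pairwise s.toList 0).2]
  rw [scan_eq_boundaries]
  simp
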